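-- pv_equiv track=rewrite | github.com/Dmdv/AlgoPy | ListsPython/main.py | filter_odd_sets
-- ===== SOURCE A (Python) =====
-- def filter_odd_sets(iterable):
--     odd = []
--     for b in iterable:
--         if b % 2 == 0:
--             odd.append(b)
--         elif odd:
--             yield odd
--             odd = []
--
--     if odd:
--         yield odd
-- ===== SOURCE B (Python) =====
-- from itertools import groupby
--
--
-- def filter_odd_sets(iterable):
--     for is_even, group in groupby(iterable, key=lambda b: b % 2 == 0):
--         if is_even:
--             yield list(group)
-- ===== Notes on version B (the rewrite author's own statement) =====
-- stated objective: idiomatic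
-- what changed: Replaces the manual append/reset accumulator state machine with itertools.groupby keyed on parity, yielding exactly the even-run groups.
import Mathlib
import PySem

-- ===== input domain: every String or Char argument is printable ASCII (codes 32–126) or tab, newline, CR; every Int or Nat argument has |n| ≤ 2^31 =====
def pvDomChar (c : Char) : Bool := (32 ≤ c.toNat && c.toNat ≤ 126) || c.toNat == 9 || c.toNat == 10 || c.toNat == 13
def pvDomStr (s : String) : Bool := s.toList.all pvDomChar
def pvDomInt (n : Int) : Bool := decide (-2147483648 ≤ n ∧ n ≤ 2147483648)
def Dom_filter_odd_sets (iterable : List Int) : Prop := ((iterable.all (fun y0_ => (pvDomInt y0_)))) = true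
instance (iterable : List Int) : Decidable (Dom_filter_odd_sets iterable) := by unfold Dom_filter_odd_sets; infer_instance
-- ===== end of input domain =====

-- B replaces A's manual append/reset accumulator state machine with parity-keyed
-- run grouping (itertools.groupby) and keeps only the even runs (idiomatic; same cost).


-- ===== PORT A =====
-- literal port of A: fold the loop state (yielded output so far, current `odd` buffer);
-- after the loop, flush the buffer if nonempty
def filterOddStep (s : List (List Int) × List Int) (b : Int) : List (List Int) × List Int :=
  if PySem.Int.mod b 2 == 0 then (s.1, s.2 ++ [b])
  else if s.2 ≠ [] then (s.1 ++ [s.2], [])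
  else s

def filter_odd_sets (iterable : List Int) : List (List Int) :=
  let s := iterable.foldl filterOddStep ([], [])
  if s.2 ≠ [] then s.1 ++ [s.2] else s.1

-- ===== PORT B =====
-- itertools.groupby: successive (key, run) pairs, runs being maximal same-key segments
def pyGroupby (key : Int → Bool) : List Int → List (Bool × List Int)
  | [] => []
  | x :: xs =>
    let k := key x
    (k, x :: xs.takeWhile (fun y => key y == k)) ::
      pyGroupby key (xs.dropWhile (fun y => key y == k))
termination_by l => l.length
decreasing_by
  simpa using Nat.lt_succ_of_le (List.length_dropWhile_le _ _)

-- the generator loop: keep the group when its key (is_even) is true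
def filter_odd_sets_alt (iterable : List Int) : List (List Int) :=
  (pyGroupby (fun b => PySem.Int.mod b 2 == 0) iterable).foldl
    (fun out p => if p.1 then out ++ [p.2] else out) []

-- ===== PRECONDITION & SPEC =====
def Spec_filter_odd_sets (iterable : List Int) (out : List (List Int)) : Prop := out = filter_odd_sets_alt iterable
instance (iterable : List Int) (out : List (List Int)) : Decidable (Spec_filter_odd_sets iterable out) := by unfold Spec_filter_odd_sets; infer_instance

-- ===== CLAIM (what is proved, stated in full; the proofs are below) =====
def Claim_equal_filter_odd_sets : Prop := ∀ (iterable : List Int), Dom_filter_odd_sets iterable → Spec_filter_odd_sets iterable (filter_odd_sets iterable)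

-- ===== LEMMAS AND PROOFS =====

-- the even test used by both ports
def pvEven (b : Int) : Bool := PySem.Int.mod b 2 == 0

theorem pyGroupby_nil (key : Int → Bool) : pyGroupby key [] = [] := by
  rw [pyGroupby.eq_def]

theorem pyGroupby_cons (key : Int → Bool) (x : Int) (xs : List Int) :
    pyGroupby key (x :: xs) =
      (key x, x :: xs.takeWhile (fun y => key y == key x)) ::
        pyGroupby key (xs.dropWhile (fun y => key y == key x)) := by
  rw [pyGroupby.eq_def]

theorem step_eq (odd : List Int) (b : Int) :
    filterOddStep ([], odd) b =
      if pvEven b then ([], odd ++ [b]) else if odd ≠ [] then ([odd], []) else ([], odd) := by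
  simp only [filterOddStep, pvEven, List.nil_append]
  rfl

theorem step_factor (out : List (List Int)) (odd : List Int) (b : Int) :
    filterOddStep (out, odd) b =
      (out ++ (filterOddStep ([], odd) b).1, (filterOddStep ([], odd) b).2) := by
  simp only [filterOddStep]
  by_cases hb : (PySem.Int.mod b 2 == 0) = true
  · rw [if_pos hb, if_pos hb]; simp
  · rw [if_neg hb, if_neg hb]
    by_cases ho : odd = []
    · rw [if_neg (by simp [ho]), if_neg (by simp [ho])]; simp
    · rw [if_pos (by simpa using ho), if_pos (by simpa using ho)]; simp

-- A's loop with output prefix factored out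
theorem foldl_step_factor (l : List Int) (out : List (List Int)) (odd : List Int) :
    l.foldl filterOddStep (out, odd) =
      (out ++ (l.foldl filterOddStep ([], odd)).1, (l.foldl filterOddStep ([], odd)).2) := by
  induction l generalizing out odd with
  | nil => simp
  | cons b l ih =>
    simp only [List.foldl_cons]
    rw [step_factor out odd b]
    rw [ih (out ++ (filterOddStep ([], odd) b).1) (filterOddStep ([], odd) b).2,
        ih (filterOddStep ([], odd) b).1 (filterOddStep ([], odd) b).2]
    simp

-- flushing the final buffer
def flushA (s : List (List Int) × List Int) : List (List Int) :=
  if s.2 ≠ [] then s.1 ++ [s.2] else s.1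

-- A's whole computation as a function of the pending buffer
def pvA (odd : List Int) (l : List Int) : List (List Int) :=
  flushA (l.foldl filterOddStep ([], odd))

theorem flushA_append (q out : List (List Int)) (r : List Int) :
    flushA (q ++ out, r) = q ++ flushA (out, r) := by
  simp only [flushA]; split <;> simp

theorem pvA_nil_list (odd : List Int) :
    pvA odd [] = if odd ≠ [] then [odd] else [] := by
  simp only [pvA, List.foldl_nil, flushA]
  split <;> simp

theorem pvA_cons (odd : List Int) (b : Int) (l : List Int) :
    pvA odd (b :: l) =
      if pvEven b then pvA (odd ++ [b]) l
      else if odd ≠ [] then odd :: pvA [] l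
      else pvA [] l := by
  show flushA ((b :: l).foldl filterOddStep ([], odd)) = _
  rw [List.foldl_cons, step_eq]
  by_cases hb : pvEven b
  · rw [if_pos hb, if_pos hb]; rfl
  · rw [if_neg hb, if_neg hb]
    by_cases ho : odd = []
    · subst ho
      rw [if_neg (by simp), if_neg (by simp)]; rfl
    · rw [if_pos (by simpa using ho), if_pos (by simpa using ho),
          foldl_step_factor l [odd] [], flushA_append]
      rfl

-- B's fold with output prefix factored out
theorem foldl_groups_factor (gs : List (Bool × List Int)) (out : List (List Int)) :
    gs.foldl (fun out p => if p.1 then out ++ [p.2] else out) out =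
      out ++ gs.foldl (fun out p => if p.1 then out ++ [p.2] else out) [] := by
  induction gs generalizing out with
  | nil => simp
  | cons p gs ih =>
    have h : ∀ q : List (List Int), (if p.1 then q ++ [p.2] else q) = q ++ (if p.1 then [p.2] else []) := by
      intro q; cases p.1 <;> simp
    simp only [List.foldl_cons]
    rw [h out, h [], List.nil_append, ih (out ++ if p.1 = true then [p.2] else []),
        ih (if p.1 = true then [p.2] else [])]
    simp

def pvB (l : List Int) : List (List Int) :=
  (pyGroupby pvEven l).foldl (fun out p => if p.1 then out ++ [p.2] else out) []

-- a nonempty pending buffer becomes (buffer ++ leading even run), then A restarts empty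
theorem pvA_pending (l : List Int) (odd : List Int) (ho : odd ≠ []) :
    pvA odd l = (odd ++ l.takeWhile pvEven) :: pvA [] (l.dropWhile pvEven) := by
  induction l generalizing odd with
  | nil => simp [pvA_nil_list, ho]
  | cons b l ih =>
    rw [pvA_cons]
    by_cases hb : pvEven b
    · rw [if_pos hb, ih _ (by simp), List.takeWhile_cons_of_pos hb,
        List.dropWhile_cons_of_pos hb]
      simp
    · rw [if_neg hb, if_pos (by simpa using ho), List.takeWhile_cons_of_neg hb,
          List.dropWhile_cons_of_neg hb, pvA_cons, if_neg hb, if_neg (by simp)]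
      simp

-- B skips a leading odd element
theorem pvB_cons_odd (b : Int) (l : List Int) (hb : ¬ pvEven b) :
    pvB (b :: l) = pvB l := by
  simp only [Bool.not_eq_true] at hb
  cases l with
  | nil =>
    rw [pvB, pyGroupby_cons, hb, pvB, pyGroupby_nil]
    simp [pyGroupby_nil]
  | cons c l =>
    by_cases hc : pvEven c
    · rw [pvB, pyGroupby_cons, hb,
          List.takeWhile_cons_of_neg (by simp [hc]), List.dropWhile_cons_of_neg (by simp [hc])]
      simp only [List.foldl_cons]
      rw [if_neg (by simp)]
      rfl
    · simp only [Bool.not_eq_true] at hc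
      rw [pvB, pyGroupby_cons, hb, pvB, pyGroupby_cons, hc,
          List.takeWhile_cons_of_pos (by simp [hc]), List.dropWhile_cons_of_pos (by simp [hc])]
      simp

theorem pvA_eq_pvB (n : Nat) : ∀ l : List Int, l.length ≤ n → pvA [] l = pvB l := by
  induction n with
  | zero =>
    intro l hl
    rw [List.length_eq_zero_iff.mp (Nat.le_zero.mp hl)]
    simp [pvA_nil_list, pvB, pyGroupby_nil]
  | succ n ih =>
    intro l hl
    cases l with
    | nil => simp [pvA_nil_list, pvB, pyGroupby_nil]
    | cons b l =>
      rw [pvA_cons]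
      by_cases hb : pvEven b
      · rw [if_pos hb, pvA_pending _ _ (by simp), pvB, pyGroupby_cons, hb]
        have hpred : (fun y => pvEven y == true) = pvEven := by
          funext y; cases pvEven y <;> rfl
        rw [hpred, List.foldl_cons, if_pos rfl, foldl_groups_factor,
            ih _ (le_trans (List.length_dropWhile_le _ _) (Nat.le_of_succ_le_succ hl))]
        simp [pvB]
      · rw [if_neg hb, if_neg (by simp), ih _ (Nat.le_of_succ_le_succ hl),
            pvB_cons_odd _ _ hb]

-- ===== VERDICT (by name: the statement is the Claim_ definition above) =====
theorem filter_odd_sets_spec : Claim_equal_filter_odd_sets := by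
  intro l _
  show filter_odd_sets l = filter_odd_sets_alt l
  have h1 : filter_odd_sets l = pvA [] l := rfl
  have h2 : filter_odd_sets_alt l = pvB l := rfl
  rw [h1, h2, pvA_eq_pvB l.length l le_rfl]
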